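-- pv_equiv track=rewrite | github.com/JinEunPark/solveAlgo | algo/new6.py | divie
-- ===== SOURCE A (Python) =====
-- def divie(s, answer):
--     first = s[0]
--     same = 0
--     notsame = 0
--
--     for i, e in enumerate(s):
--         if e == first:
--             same += 1
--         else:
--             notsame += 1
--
--         if same == notsame and len(s) >= 2 and i != len(s)-1:
--             answer =+ divie(s[i + 1:], answer)
--             return answer + 1
--     return answer
-- ===== SOURCE B (Python) =====
-- def divie(s, answer):
--     count = 0
--     same = 0
--     notsame = 0
--     first = None
--     n = len(s)
--     for i, e in enumerate(s):
--         if first is None: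
--             first = e
--         if e == first:
--             same += 1
--         else:
--             notsame += 1
--         if same == notsame and i != n - 1:
--             count += 1
--             same = 0
--             notsame = 0
--             first = None
--     return answer + count
-- ===== Notes on version B (the rewrite author's own statement) =====
-- stated objective: faster
-- what changed: Replaced A's slice-and-recurse scheme (re-slicing the string and restarting the scan after each balanced split) by a single linear pass that resets the counters and the piece's first character in place at each split and accumulates a count.
import Mathlib
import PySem

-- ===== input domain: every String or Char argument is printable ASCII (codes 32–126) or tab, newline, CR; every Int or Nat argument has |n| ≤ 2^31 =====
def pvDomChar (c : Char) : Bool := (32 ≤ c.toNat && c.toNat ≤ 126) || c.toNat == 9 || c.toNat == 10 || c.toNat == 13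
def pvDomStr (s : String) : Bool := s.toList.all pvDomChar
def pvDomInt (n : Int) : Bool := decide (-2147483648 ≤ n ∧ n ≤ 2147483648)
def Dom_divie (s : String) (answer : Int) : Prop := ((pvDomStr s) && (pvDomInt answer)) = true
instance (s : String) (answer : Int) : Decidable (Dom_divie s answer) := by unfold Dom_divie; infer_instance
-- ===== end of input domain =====

-- B replaces A's slice-and-recurse scan with a single linear pass that resets
-- counters at each balanced split (objective: faster, asymptotic).


-- ===== PORT A =====
-- The for-loop with early return is the recursion divieA_go; the recursive call
-- divie(s[i+1:], answer) is divieA_list on the remaining suffix.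
mutual
def divieA_list (l : List Char) (answer : Int) : Int :=
  if h : l = [] then answer  -- Python raises IndexError here (s[0]); excluded by Pre_divie
  else divieA_go (l.head h) l.length l 0 0 0 answer
  termination_by (l.length, 1)
def divieA_go (first : Char) (n : Nat) (rest : List Char) (i : Nat)
    (same notsame : Int) (answer : Int) : Int :=
  match rest with
  | [] => answer
  | e :: rs =>
    let same' := if e = first then same + 1 else same
    let notsame' := if e = first then notsame else notsame + 1
    if same' = notsame' ∧ 2 ≤ n ∧ i ≠ n - 1 then
      (divieA_list rs answer) + 1     -- answer =+ divie(s[i+1:], answer); return answer + 1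
    else
      divieA_go first n rs (i + 1) same' notsame' answer
  termination_by (rest.length, 0)
end

def divie (s : String) (answer : Int) : Int := divieA_list s.toList answer

-- ===== PORT B =====
def divieB_go (n : Nat) (l : List Char) (i : Nat) (first : Option Char)
    (same notsame : Int) (count : Int) : Int :=
  match l with
  | [] => count
  | e :: rs =>
    let f := first.getD e                        -- if first is None: first = e
    let same' := if e = f then same + 1 else same
    let notsame' := if e = f then notsame else notsame + 1
    if same' = notsame' ∧ i ≠ n - 1 then
      divieB_go n rs (i + 1) none 0 0 (count + 1)
    else
      divieB_go n rs (i + 1) (some f) same' notsame' count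

def divie_alt (s : String) (answer : Int) : Int :=
  answer + divieB_go s.toList.length s.toList 0 none 0 0 0

-- ===== PRECONDITION & SPEC =====
-- Pre_ excludes only the empty string, on which Python A raises IndexError at s[0].
def Pre_divie (s : String) (answer : Int) : Prop := s ≠ ""
instance (s : String) (answer : Int) : Decidable (Pre_divie s answer) := by unfold Pre_divie; infer_instance
def pvWitness_divie : String × Int := ("aabbab", 3)

def Spec_divie (s : String) (answer : Int) (out : Int) : Prop := out = divie_alt s answer
instance (s : String) (answer : Int) (out : Int) : Decidable (Spec_divie s answer out) := by unfold Spec_divie; infer_instance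

-- ===== CLAIM (what is proved, stated in full; the proofs are below) =====
def Claim_equal_divie : Prop := ∀ (s : String) (answer : Int), Dom_divie s answer → Pre_divie s answer → Spec_divie s answer (divie s answer)

-- ===== LEMMAS AND PROOFS =====

-- unfolding equations for the ports
lemma A_list_nil (answer : Int) : divieA_list [] answer = answer := by
  rw [divieA_list]; simp

lemma A_list_cons (c : Char) (cs : List Char) (answer : Int) :
    divieA_list (c :: cs) answer
      = divieA_go c (c :: cs).length (c :: cs) 0 0 0 answer := by
  rw [divieA_list]; simp

lemma A_go_nil (first : Char) (n i : Nat) (same notsame answer : Int) :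
    divieA_go first n [] i same notsame answer = answer := by
  rw [divieA_go]

lemma A_go_cons (first e : Char) (rs : List Char) (n i : Nat) (same notsame answer : Int) :
    divieA_go first n (e :: rs) i same notsame answer
      = if (if e = first then same + 1 else same) = (if e = first then notsame else notsame + 1)
            ∧ 2 ≤ n ∧ i ≠ n - 1 then
          (divieA_list rs answer) + 1
        else
          divieA_go first n rs (i + 1) (if e = first then same + 1 else same)
            (if e = first then notsame else notsame + 1) answer := by
  rw [divieA_go]

lemma B_go_nil (n i : Nat) (first : Option Char) (same notsame count : Int) :
    divieB_go n [] i first same notsame count = count := rfl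

lemma B_go_cons (e : Char) (rs : List Char) (n i : Nat) (first : Option Char)
    (same notsame count : Int) :
    divieB_go n (e :: rs) i first same notsame count
      = if (if e = first.getD e then same + 1 else same)
            = (if e = first.getD e then notsame else notsame + 1) ∧ i ≠ n - 1 then
          divieB_go n rs (i + 1) none 0 0 (count + 1)
        else
          divieB_go n rs (i + 1) (some (first.getD e))
            (if e = first.getD e then same + 1 else same)
            (if e = first.getD e then notsame else notsame + 1) count := rfl

lemma B_go_cons_some (e first : Char) (rs : List Char) (n i : Nat)
    (same notsame count : Int) :
    divieB_go n (e :: rs) i (some first) same notsame count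
      = if (if e = first then same + 1 else same)
            = (if e = first then notsame else notsame + 1) ∧ i ≠ n - 1 then
          divieB_go n rs (i + 1) none 0 0 (count + 1)
        else
          divieB_go n rs (i + 1) (some first)
            (if e = first then same + 1 else same)
            (if e = first then notsame else notsame + 1) count := rfl

-- B's accumulator adds on: pull the count out front.
lemma divieB_go_acc (l : List Char) : ∀ (n i : Nat) (first : Option Char)
    (same notsame count : Int),
    divieB_go n l i first same notsame count
      = count + divieB_go n l i first same notsame 0 := by
  induction l with
  | nil => intro n i first same notsame count; simp [B_go_nil]
  | cons e rs ih =>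
    intro n i first same notsame count
    rw [B_go_cons, B_go_cons]
    by_cases h : (if e = first.getD e then same + 1 else same)
        = (if e = first.getD e then notsame else notsame + 1) ∧ i ≠ n - 1
    · rw [if_pos h, if_pos h, ih n (i+1) none 0 0 (count+1), ih n (i+1) none 0 0 (0+1)]
      ring
    · rw [if_neg h, if_neg h]; exact ih _ _ _ _ _ count

-- B's loop depends on i and n only through the remaining length (last-index test).
lemma divieB_go_shift (l : List Char) : ∀ (n i n' i' : Nat) (first : Option Char)
    (same notsame count : Int),
    n = i + l.length → n' = i' + l.length →
    divieB_go n l i first same notsame count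
      = divieB_go n' l i' first same notsame count := by
  induction l with
  | nil => intro n i n' i' first same notsame count _ _; rw [B_go_nil, B_go_nil]
  | cons e rs ih =>
    intro n i n' i' first same notsame count hn hn'
    simp only [List.length_cons] at hn hn'
    have hceq : ((if e = first.getD e then same + 1 else same)
          = (if e = first.getD e then notsame else notsame + 1) ∧ i ≠ n - 1)
        ↔ ((if e = first.getD e then same + 1 else same)
          = (if e = first.getD e then notsame else notsame + 1) ∧ i' ≠ n' - 1) :=
      and_congr_right (fun _ => by omega)
    rw [B_go_cons, B_go_cons]
    by_cases h : (if e = first.getD e then same + 1 else same)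
        = (if e = first.getD e then notsame else notsame + 1) ∧ i ≠ n - 1
    · rw [if_pos h, if_pos (hceq.mp h)]
      exact ih n (i+1) n' (i'+1) none 0 0 (count+1) (by omega) (by omega)
    · rw [if_neg h, if_neg (fun hx => h (hceq.mpr hx))]
      exact ih n (i+1) n' (i'+1) _ _ _ count (by omega) (by omega)

-- Joint induction: a fresh call of A equals answer plus B's fresh count, via an
-- inner lemma aligning A's scan of a piece with B's global pass mid-string.
lemma divie_main (k : Nat) : ∀ (l : List Char), l.length ≤ k → ∀ (answer : Int),
    divieA_list l answer = answer + divieB_go l.length l 0 none 0 0 0 := by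
  induction k with
  | zero =>
    intro l hl answer
    have h0 : l = [] := List.eq_nil_of_length_eq_zero (Nat.le_zero.mp hl)
    subst h0; rw [A_list_nil, B_go_nil]; ring
  | succ k ih =>
    have inner : ∀ (rest : List Char) (i n : Nat) (first : Char) (same notsame answer : Int),
        rest.length ≤ k → n = i + rest.length →
        0 ≤ same → 0 ≤ notsame → same + notsame = (i : Int) →
        divieA_go first n rest i same notsame answer
          = answer + divieB_go n rest i (some first) same notsame 0 := by
      intro rest
      induction rest with
      | nil =>
        intro i n first same notsame answer _ _ _ _ _
        rw [A_go_nil, B_go_nil]; ring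
      | cons e rs ihr =>
        intro i n first same notsame answer hlen hn hs hns hsum
        simp only [List.length_cons] at hlen hn
        rw [A_go_cons, B_go_cons_some]
        by_cases hc : ((if e = first then same + 1 else same)
            = (if e = first then notsame else notsame + 1)) ∧ i ≠ n - 1
        · -- the split fires; equality of the counts forces n ≥ 2
          have h2n : 2 ≤ n := by
            have heq := hc.1
            by_cases he : e = first
            · simp only [if_pos he] at heq; omega
            · simp only [if_neg he] at heq; omega
          rw [if_pos ⟨hc.1, h2n, hc.2⟩, if_pos hc]
          rw [divieB_go_acc rs n (i+1) none 0 0 (0+1),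
              divieB_go_shift rs n (i+1) rs.length 0 none 0 0 0 (by omega) (by omega),
              ih rs (by omega) answer]
          ring
        · rw [if_neg (fun h => hc ⟨h.1, h.2.2⟩), if_neg hc]
          by_cases he : e = first
          · simp only [if_pos he]
            exact ihr (i+1) n first (same+1) notsame answer (by omega) (by omega)
              (by omega) hns (by push_cast; omega)
          · simp only [if_neg he]
            exact ihr (i+1) n first same (notsame+1) answer (by omega) (by omega)
              hs (by omega) (by push_cast; omega)
    intro l hl answer
    match l with
    | [] => rw [A_list_nil, B_go_nil]; ring
    | c :: cs =>
      simp only [List.length_cons] at hl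
      rw [A_list_cons, A_go_cons, B_go_cons]
      rw [if_neg (by simp :
            ¬ (((if c = c then (0:Int) + 1 else 0) = if c = c then 0 else 0 + 1)
              ∧ 2 ≤ (c :: cs).length ∧ 0 ≠ (c :: cs).length - 1)),
          if_neg (by simp :
            ¬ (((if c = (Option.none.getD c) then (0:Int) + 1 else 0)
                = if c = (Option.none.getD c) then 0 else 0 + 1)
              ∧ 0 ≠ (c :: cs).length - 1))]
      have e1 : (if c = c then (0:Int) + 1 else 0) = 0 + 1 := if_pos rfl
      have e2 : (if c = c then (0:Int) else 0 + 1) = 0 := if_pos rfl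
      have e3 : (Option.none.getD c) = c := rfl
      rw [e3, e1, e2]
      exact inner cs (0+1) (c :: cs).length c (0+1) 0 answer (by omega)
        (by simp only [List.length_cons]; omega) (by omega) (by omega)
        (by push_cast)

-- ===== VERDICT (by name: the statement is the Claim_ definition above) =====
theorem divie_spec : Claim_equal_divie := by
  intro s answer _ _
  unfold Spec_divie divie divie_alt
  exact divie_main s.toList.length s.toList (le_refl _) answer
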